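-- pv_equiv track=rewrite | github.com/GontarRV/Python | tasks28/LineAnalysis.py | LineAnalysis
-- ===== SOURCE A (Python) =====
-- def LineAnalysis(line: str) -> bool:
--
--     if line[0] != '*' or line[len(line) - 1] != '*':
--         return False
--
--     string_of_dots = line.replace('*', '')
--     if string_of_dots == '':
--         return True
--
--     for i in range(len(string_of_dots)):
--         if string_of_dots[i] != '.':
--             return False
--
--     if line.count('*') < 3:
--         return True
--
--     string_check = '*'
--     for i in range(1, len(line)):
--         if line[i] != '*':
--             string_check += line[i]
--
--         if line[i] == '*':
--             break
--     string_check *= len(line) // len(string_check)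
--     string_check += '*'
--
--     if string_check == line:
--         return True
--     return False
-- ===== SOURCE B (Python) =====
-- def LineAnalysis(line: str) -> bool:
--     if not (line.startswith('*') and line.endswith('*')):
--         return False
--     parts = line.split('*')
--     dots = ''.join(parts)
--     if dots == '':
--         return True
--     if any(c != '.' for c in dots):
--         return False
--     if line.count('*') < 3:
--         return True
--     gaps = parts[1:-1]
--     return all(len(g) == len(gaps[0]) for g in gaps)
-- ===== Notes on version B (the rewrite author's own statement) =====
-- stated objective: simpler
-- what changed: B replaces A's char-by-char dot scan and first-gap string-tiling equality check (build star+first gap, repeat it len//len times, compare to the line) by a direct test that all interior parts of the line split at stars have equal length.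
import Mathlib
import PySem

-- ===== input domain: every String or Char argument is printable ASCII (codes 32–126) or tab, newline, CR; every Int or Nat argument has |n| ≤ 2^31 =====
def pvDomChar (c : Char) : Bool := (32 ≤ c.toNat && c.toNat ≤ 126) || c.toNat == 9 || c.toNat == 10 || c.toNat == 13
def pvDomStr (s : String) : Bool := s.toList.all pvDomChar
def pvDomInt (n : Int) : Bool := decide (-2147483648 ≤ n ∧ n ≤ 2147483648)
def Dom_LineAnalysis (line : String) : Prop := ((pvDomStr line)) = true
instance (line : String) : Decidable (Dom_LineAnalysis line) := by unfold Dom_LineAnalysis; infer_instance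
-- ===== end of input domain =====

-- B replaces A's first-gap tiling/string-equality check by a direct equal-length test on the
-- interior parts of the line split at stars (objective: simpler). A raises IndexError on the empty string, excluded by Pre_.

-- ===== PORT A =====

-- the 'for i in range(len(string_of_dots))' loop: returns false at the first non-dot, true if none
def pvADots : List Char → Bool
  | [] => true
  | c :: rest => if c ≠ '.' then false else pvADots rest

-- the 'for i in range(1, len(line))' loop over line[1:], building string_check from '*' and breaking at '*'
def pvABlock : List Char → List Char → List Char
  | [], acc => acc
  | c :: rest, acc =>
      let acc' := if c ≠ '*' then acc ++ [c] else acc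
      if c = '*' then acc' else pvABlock rest acc'

def LineAnalysis (line : String) : Bool :=
  let cs := line.toList
  match PySem.List.pyGet? cs 0, PySem.List.pyGet? cs (PySem.Chars.len cs - 1) with
  | some c0, some cl =>
    if c0 ≠ '*' ∨ cl ≠ '*' then false
    else
      let dots := PySem.Chars.replace cs ['*'] []
      if dots = [] then true
      else if pvADots dots = false then false
      else if PySem.Chars.count cs ['*'] < 3 then true
      else
        let sc := pvABlock (cs.drop 1) ['*']
        let sc2 := PySem.List.pyRepeat sc (PySem.Int.floordiv (PySem.Chars.len cs) (PySem.List.len sc))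
        if sc2 ++ ['*'] = cs then true else false
  | _, _ => false   -- unreachable under Pre_ (IndexError on the empty string)

-- ===== PORT B =====
def LineAnalysis_alt (line : String) : Bool :=
  let cs := line.toList
  if ¬ (PySem.Chars.startswith cs ['*'] ∧ PySem.Chars.endswith cs ['*']) then false
  else
    let parts := PySem.Chars.splitOn cs ['*']
    let dots := PySem.Chars.join [] parts
    if dots = [] then true
    else if dots.any (fun c => c ≠ '.') then false
    else if PySem.Chars.count cs ['*'] < 3 then true
    else
      let gaps := PySem.List.slice parts (some 1) (some (-1))
      gaps.all (fun g => g.length == (gaps.headD []).length)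

-- ===== PRECONDITION & SPEC =====
-- Pre_ excludes only the empty string, on which A raises IndexError at line[0].
def Pre_LineAnalysis (line : String) : Prop := line ≠ ""
instance (line : String) : Decidable (Pre_LineAnalysis line) := by unfold Pre_LineAnalysis; infer_instance
def pvWitness_LineAnalysis : String := "*.*.*"

def Spec_LineAnalysis (line : String) (out : Bool) : Prop := out = LineAnalysis_alt line
instance (line : String) (out : Bool) : Decidable (Spec_LineAnalysis line out) := by unfold Spec_LineAnalysis; infer_instance

-- ===== CLAIM =====
def Claim_equal_LineAnalysis : Prop := ∀ (line : String), Dom_LineAnalysis line → Pre_LineAnalysis line → Spec_LineAnalysis line (LineAnalysis line)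

-- ===== LEMMAS AND PROOFS =====

def pvSplitChar : List Char → List (List Char)
  | [] => [[]]
  | c :: r =>
      match pvSplitChar r with
      | [] => [[]]
      | p :: ps => if c = '*' then [] :: p :: ps else (c :: p) :: ps

theorem pvSplitChar_ne_nil (cs : List Char) : pvSplitChar cs ≠ [] := by
  cases cs with
  | nil => simp [pvSplitChar]
  | cons c r =>
    simp only [pvSplitChar]
    cases h : pvSplitChar r with
    | nil => simp
    | cons p ps =>
      split
      · intro hc; cases hc
      · split <;> simp

theorem pvSplitOn_go_spec (fuel : Nat) : ∀ (l cur : List Char) (accs : List (List Char)),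
    l.length ≤ fuel →
    PySem.Chars.splitOn.go ['*'] fuel l cur accs =
      accs.reverse ++ (match pvSplitChar l with
        | [] => []
        | p :: ps => (cur.reverse ++ p) :: ps) := by
  induction fuel with
  | zero =>
    intro l cur accs h
    have hl : l = [] := by cases l <;> simp at h ⊢
    subst hl
    show ((cur.reverse ++ []) :: accs).reverse = _
    simp [pvSplitChar]
  | succ fuel ih =>
    intro l cur accs h
    cases l with
    | nil =>
      show (cur.reverse :: accs).reverse = _
      simp [pvSplitChar]
    | cons c rest =>
      have step : PySem.Chars.splitOn.go ['*'] (fuel+1) (c :: rest) cur accs =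
          if ['*'].isPrefixOf (c::rest) then PySem.Chars.splitOn.go ['*'] fuel rest [] (cur.reverse :: accs)
          else PySem.Chars.splitOn.go ['*'] fuel rest (c :: cur) accs := rfl
      rw [step]
      have hr : rest.length ≤ fuel := by simpa using h
      by_cases hc : c = '*'
      · subst hc
        rw [if_pos (by simp [List.isPrefixOf])]
        rw [ih rest [] (cur.reverse :: accs) hr]
        simp only [pvSplitChar]
        cases hsc : pvSplitChar rest with
        | nil => exact absurd hsc (pvSplitChar_ne_nil rest)
        | cons p ps => simp
      · rw [if_neg (by simp [List.isPrefixOf, hc]; exact fun h => absurd h.symm hc)]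
        rw [ih rest (c :: cur) accs hr]
        simp only [pvSplitChar]
        cases hsc : pvSplitChar rest with
        | nil => exact absurd hsc (pvSplitChar_ne_nil rest)
        | cons p ps => simp [hc]

theorem pvSplitOn_eq (cs : List Char) : PySem.Chars.splitOn cs ['*'] = pvSplitChar cs := by
  show PySem.Chars.splitOn.go ['*'] (cs.length + 1) cs [] [] = _
  rw [pvSplitOn_go_spec (cs.length + 1) cs [] [] (by omega)]
  cases hsc : pvSplitChar cs with
  | nil => exact absurd hsc (pvSplitChar_ne_nil cs)
  | cons p ps => simp

theorem pvReplace_go_spec (fuel : Nat) : ∀ (l acc : List Char), l.length ≤ fuel →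
    PySem.Chars.replace.go ['*'] [] fuel l acc = acc.reverse ++ l.filter (· ≠ '*') := by
  induction fuel with
  | zero =>
    intro l acc h
    have hl : l = [] := by cases l <;> simp at h ⊢
    subst hl
    show acc.reverse ++ [] = _
    simp
  | succ fuel ih =>
    intro l acc h
    cases l with
    | nil => show acc.reverse = _; simp
    | cons c rest =>
      have step : PySem.Chars.replace.go ['*'] [] (fuel+1) (c :: rest) acc =
          if ['*'].isPrefixOf (c::rest) then PySem.Chars.replace.go ['*'] [] fuel rest acc
          else PySem.Chars.replace.go ['*'] [] fuel rest (c :: acc) := rfl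
      rw [step]
      have hr : rest.length ≤ fuel := by simpa using h
      by_cases hc : c = '*'
      · subst hc
        rw [if_pos (by simp [List.isPrefixOf]), ih rest acc hr]
        simp
      · rw [if_neg (by simp [List.isPrefixOf]; exact fun h => absurd h.symm hc), ih rest (c :: acc) hr]
        simp [hc]

theorem pvReplace_eq (cs : List Char) :
    PySem.Chars.replace cs ['*'] [] = cs.filter (· ≠ '*') := by
  show (if (['*'] : List Char).isEmpty then ([] : List Char) ++ cs.flatMap (fun c => c :: []) else PySem.Chars.replace.go ['*'] [] cs.length cs []) = _
  rw [if_neg (by simp), pvReplace_go_spec cs.length cs [] le_rfl]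
  simp

theorem pvCount_go_spec (fuel : Nat) : ∀ (l : List Char) (acc : Nat), l.length ≤ fuel →
    PySem.Chars.count.go ['*'] fuel l acc = acc + l.count '*' := by
  induction fuel with
  | zero =>
    intro l acc h
    have hl : l = [] := by cases l <;> simp at h ⊢
    subst hl; show acc = _; simp
  | succ fuel ih =>
    intro l acc h
    cases l with
    | nil => show acc = _; simp
    | cons c rest =>
      have step : PySem.Chars.count.go ['*'] (fuel+1) (c :: rest) acc =
          if ['*'].isPrefixOf (c::rest) then PySem.Chars.count.go ['*'] fuel rest (acc+1)
          else PySem.Chars.count.go ['*'] fuel rest acc := rfl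
      rw [step]
      have hr : rest.length ≤ fuel := by simpa using h
      by_cases hc : c = '*'
      · subst hc
        rw [if_pos (by simp [List.isPrefixOf]), ih rest (acc+1) hr]
        simp [List.count_cons]; omega
      · rw [if_neg (by simp [List.isPrefixOf]; exact fun h => absurd h.symm hc), ih rest acc hr]
        simp [List.count_cons, hc]

theorem pvCount_eq (cs : List Char) : PySem.Chars.count cs ['*'] = cs.count '*' := by
  show (if (['*'] : List Char).isEmpty then cs.length + 1 else PySem.Chars.count.go ['*'] cs.length cs 0) = _
  rw [if_neg (by simp), pvCount_go_spec cs.length cs 0 le_rfl]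
  omega

theorem pvFilter_eq_flatten (cs : List Char) :
    cs.filter (· ≠ '*') = (pvSplitChar cs).flatten := by
  induction cs with
  | nil => simp [pvSplitChar]
  | cons c r ih =>
    simp only [pvSplitChar]
    cases hsc : pvSplitChar r with
    | nil => exact absurd hsc (pvSplitChar_ne_nil r)
    | cons p ps =>
      rw [hsc] at ih
      by_cases hc : c = '*'
      · subst hc; simp only [List.filter_cons]; simpa using ih
      · simp only [List.filter_cons, List.flatten_cons]
        rw [if_pos (by simp [hc])]
        simpa [hc] using ih

theorem pvCount_eq_parts (cs : List Char) :
    cs.count '*' + 1 = (pvSplitChar cs).length := by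
  induction cs with
  | nil => simp [pvSplitChar]
  | cons c r ih =>
    simp only [pvSplitChar]
    cases hsc : pvSplitChar r with
    | nil => exact absurd hsc (pvSplitChar_ne_nil r)
    | cons p ps =>
      rw [hsc] at ih
      by_cases hc : c = '*'
      · subst hc; simp [List.count_cons] at ih ⊢; omega
      · simp [List.count_cons, hc] at ih ⊢; omega

theorem pvADots_eq (l : List Char) : pvADots l = !(l.any (fun c => c ≠ '.')) := by
  induction l with
  | nil => simp [pvADots]
  | cons c r ih =>
    by_cases hc : c = '.'
    · simp [pvADots, hc, ih]
    · simp [pvADots, hc]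

def pvEnc (gs : List (List Char)) : List Char :=
  '*' :: (gs.map (· ++ ['*'])).flatten

theorem pvSplitChar_append_gap (g r : List Char) (h : '*' ∉ g) :
    pvSplitChar (g ++ '*' :: r) = g :: pvSplitChar r := by
  induction g with
  | nil =>
    simp only [List.nil_append, pvSplitChar]
    cases hsc : pvSplitChar r with
    | nil => exact absurd hsc (pvSplitChar_ne_nil r)
    | cons p ps => simp
  | cons c gr ih =>
    have hc : c ≠ '*' := by intro hc; exact h (by simp [hc])
    have h' : '*' ∉ gr := fun hm => h (by simp [hm])
    simp only [List.cons_append, pvSplitChar, ih h']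
    simp [hc]

theorem pvSplitChar_enc (gs : List (List Char)) (h : ∀ g ∈ gs, '*' ∉ g) :
    pvSplitChar (pvEnc gs) = [] :: (gs ++ [[]]) := by
  induction gs with
  | nil => simp [pvEnc, pvSplitChar]
  | cons g gr ih =>
    have hg : '*' ∉ g := h g (by simp)
    have h' : ∀ x ∈ gr, '*' ∉ x := fun x hx => h x (by simp [hx])
    have : pvEnc (g :: gr) = '*' :: (g ++ '*' :: (pvEnc gr).tail) := by
      simp [pvEnc]
    rw [this]
    simp only [pvSplitChar]
    have htail : (pvEnc gr).tail = (gr.map (· ++ ['*'])).flatten := by simp [pvEnc]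
    rw [htail, show ((gr.map (· ++ ['*'])).flatten : List Char) = (pvEnc gr).tail from by simp [pvEnc]]
    have : pvSplitChar (g ++ '*' :: (pvEnc gr).tail) = g :: pvSplitChar ((pvEnc gr).tail) := by
      have := pvSplitChar_append_gap g ((pvEnc gr).tail) hg
      exact this
    rw [this]
    have hrec : pvSplitChar ('*' :: (pvEnc gr).tail) = pvSplitChar (pvEnc gr) := by
      simp [pvEnc]
    -- pvEnc gr = '*' :: tail, so pvSplitChar (pvEnc gr) = [] :: pvSplitChar tail by def
    have hstep : pvSplitChar (pvEnc gr) = [] :: pvSplitChar ((pvEnc gr).tail) := by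
      simp only [pvEnc, pvSplitChar, List.tail_cons]
      cases hsc : pvSplitChar ((gr.map (· ++ ['*'])).flatten) with
      | nil => exact absurd hsc (pvSplitChar_ne_nil _)
      | cons p ps => simp
    rw [ih h'] at hstep
    have : pvSplitChar ((pvEnc gr).tail) = gr ++ [[]] := by
      cases hstep' : pvSplitChar ((pvEnc gr).tail) with
      | nil => exact absurd hstep' (pvSplitChar_ne_nil _)
      | cons p ps => rw [hstep'] at hstep; injection hstep with h1 h2; rw [h2]
    rw [this]
    simp

theorem pvEnc_rep (q : Nat) (g : List Char) :
    (List.replicate q ('*' :: g)).flatten ++ ['*'] = pvEnc (List.replicate q g) := by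
  induction q with
  | zero => simp [pvEnc]
  | succ n ih =>
    rw [List.replicate_succ, List.flatten_cons, List.replicate_succ]
    simp only [pvEnc, List.map_cons, List.flatten_cons] at ih ⊢
    simp [List.cons_append, List.append_assoc, ih]

theorem pvABlock_spec (g r acc : List Char) (h : '*' ∉ g) :
    pvABlock (g ++ '*' :: r) acc = acc ++ g := by
  induction g generalizing acc with
  | nil => simp [pvABlock]
  | cons c gr ih =>
    have hc : c ≠ '*' := by intro hc; exact h (by simp [hc])
    have h' : '*' ∉ gr := fun hm => h (by simp [hm])
    simp only [List.cons_append, pvABlock, hc, if_false, ite_true, if_neg hc]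
    rw [if_pos (by simp [hc])] -- acc' branch
    rw [ih (acc ++ [c]) h']
    simp

theorem pvStarFree (cs : List Char) : ∀ g ∈ pvSplitChar cs, '*' ∉ g := by
  induction cs with
  | nil => simp [pvSplitChar]
  | cons c r ih =>
    simp only [pvSplitChar]
    cases hsc : pvSplitChar r with
    | nil => simp
    | cons p ps =>
      rw [hsc] at ih
      by_cases hc : c = '*'
      · simp only [if_pos hc]
        intro g hg
        rcases List.mem_cons.mp hg with h1 | h2
        · simp [h1]
        · exact ih g h2
      · simp only [if_neg hc]
        intro g hg
        rcases List.mem_cons.mp hg with h1 | h2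
        · subst h1
          intro hm
          rcases List.mem_cons.mp hm with h3 | h4
          · exact hc h3.symm
          · exact ih p (by simp) h4
        · exact ih g (by simp [h2])

theorem pvUnsplit (cs : List Char) :
    ∀ p ps, pvSplitChar cs = p :: ps → cs = p ++ (ps.map (fun g => '*' :: g)).flatten := by
  induction cs with
  | nil =>
    intro p ps h
    simp only [pvSplitChar] at h
    injection h with h1 h2
    rw [← h1, ← h2]; simp
  | cons c r ih =>
    intro p ps h
    cases hsc : pvSplitChar r with
    | nil => exact absurd hsc (pvSplitChar_ne_nil r)
    | cons q qs =>
      have hx : pvSplitChar (c :: r) = if c = '*' then [] :: q :: qs else (c :: q) :: qs := by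
        simp only [pvSplitChar, hsc]
      rw [hx] at h
      by_cases hc : c = '*'
      · rw [if_pos hc] at h
        injection h.symm with h1 h2
        rw [h1, h2]; subst hc
        simp [List.flatten_cons, ← ih q qs hsc]
      · rw [if_neg hc] at h
        injection h.symm with h1 h2
        rw [h1, h2]
        simpa using congrArg (c :: ·) (ih q qs hsc)

theorem pvFlattenStar (gs : List (List Char)) :
    ((gs ++ [[]]).map (fun g => '*' :: g)).flatten = pvEnc gs := by
  induction gs with
  | nil => simp [pvEnc]
  | cons g gr ih => simp_all [pvEnc, List.append_assoc]

theorem pvDecomp (cs : List Char) (hne : cs ≠ [])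
    (h0 : cs.head? = some '*') (h1 : cs.getLast? = some '*') :
    ∃ gs, (∀ g ∈ gs, '*' ∉ g) ∧ cs = pvEnc gs := by
  cases hsc : pvSplitChar cs with
  | nil => exact absurd hsc (pvSplitChar_ne_nil cs)
  | cons p ps =>
    have hcs := pvUnsplit cs p ps hsc
    have hsf := pvStarFree cs
    rw [hsc] at hsf
    -- p = []
    have hp : p = [] := by
      cases p with
      | nil => rfl
      | cons a t =>
        exfalso
        have : a = '*' := by rw [hcs] at h0; simpa using h0
        exact hsf (a :: t) (by simp) (by simp [this])
    subst hp
    simp only [List.nil_append] at hcs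
    -- ps ≠ []
    cases hps : ps.reverse with
    | nil =>
      exfalso
      have : ps = [] := by simpa using congrArg List.reverse hps
      rw [this] at hcs; simp at hcs; exact hne hcs
    | cons q qs =>
      have hps' : ps = qs.reverse ++ [q] := by
        have := congrArg List.reverse hps
        simpa using this
      -- q ends the string; q = []
      have hq : q = [] := by
        cases hqq : q.reverse with
        | nil => simpa using congrArg List.reverse hqq
        | cons d ds =>
          exfalso
          have hqd : q = ds.reverse ++ [d] := by simpa using congrArg List.reverse hqq
          have : cs.getLast? = some d := by
            rw [hcs, hps', hqd]
            simp
            rw [show ('*' :: (ds.reverse ++ [d])) = (('*' :: ds.reverse) ++ [d]) from by simp]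
            exact List.getLast?_concat
          rw [h1] at this
          injection this with hd
          exact hsf q (by simp [hps']) (by simp [hqd, ← hd])
      subst hq
      refine ⟨qs.reverse, fun g hg => hsf g (by simp [hps', hg]), ?_⟩
      rw [hcs, hps', pvFlattenStar]

theorem pvSliceMid (a b : List Char) (gs : List (List Char)) :
    PySem.List.slice (a :: (gs ++ [b])) (some 1) (some (-1)) = gs := by
  simp [PySem.List.slice, PySem.List.clampIdx]
  rw [if_neg (by push_cast; omega)]
  simpa using List.take_left gs [b]

theorem pvIntercalateNil (cs : List (List Char)) :
    List.intercalate ([]:List Char) cs = cs.flatten := by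
  simp [List.intercalate]
  induction cs with
  | nil => simp
  | cons a l ih => cases l <;> simp_all [List.intersperse]

theorem pvTiling (gs : List (List Char)) (g1 : List Char)
    (hhead : gs.headD [] = g1)
    (hlen : 2 ≤ gs.length)
    (hdots : ∀ g ∈ gs, ∀ c ∈ g, c = '.')
    (hfl : gs.flatten ≠ []) :
    ((List.replicate ((pvEnc gs).length / (g1.length + 1)) ('*' :: g1)).flatten ++ ['*'] = pvEnc gs)
      ↔ (∀ g ∈ gs, g.length = g1.length) := by
  have hsf : ∀ g ∈ gs, '*' ∉ g := by
    intro g hg hm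
    have := hdots g hg '*' hm
    simp at this
  have hg1 : g1 ∈ gs := by
    cases gs with
    | nil => simp at hlen
    | cons x xs => simp at hhead; simp [← hhead]
  have hrep : ∀ g ∈ gs, g = List.replicate g.length '.' := by
    intro g hg
    exact List.eq_replicate_length.mpr (fun c hc => hdots g hg c hc)
  have hd1 : g1 = List.replicate g1.length '.' := hrep g1 hg1
  constructor
  · intro ht
    rw [pvEnc_rep] at ht
    have hsp := congrArg pvSplitChar ht
    rw [pvSplitChar_enc gs hsf] at hsp
    rw [pvSplitChar_enc _ (by
      intro g hg
      rw [List.eq_of_mem_replicate hg, hd1]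
      simp)] at hsp
    injection hsp with _ hsp2
    have hgs := List.append_cancel_right hsp2
    intro g hg
    rw [← hgs] at hg
    rw [List.eq_of_mem_replicate hg]
  · intro hall
    have hgg : ∀ g ∈ gs, g = g1 := by
      intro g hg
      rw [hrep g hg, hall g hg, ← hd1]
    have hgs : gs = List.replicate gs.length g1 := List.eq_replicate_length.mpr hgg
    have hd1pos : 1 ≤ g1.length := by
      by_contra hc
      apply hfl
      rw [List.flatten_eq_nil_iff]
      intro g hg
      rw [hgg g hg]
      have : g1.length = 0 := by omega
      exact List.eq_nil_of_length_eq_zero this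
    have hlenEnc : (pvEnc gs).length = gs.length * (g1.length + 1) + 1 := by
      rw [hgs]
      simp [pvEnc, List.map_replicate]
    have hq : (pvEnc gs).length / (g1.length + 1) = gs.length := by
      rw [hlenEnc, Nat.add_comm, Nat.add_mul_div_right _ _ (show 0 < g1.length + 1 by omega)]
      simp [Nat.div_eq_of_lt (show 1 < g1.length + 1 by omega)]
    rw [hq, pvEnc_rep, ← hgs]


theorem pvMain (line : String) (hpre : line ≠ "") : LineAnalysis line = LineAnalysis_alt line := by
  have hcs : line.toList ≠ [] := by
    intro h
    apply hpre
    exact String.toList_inj.mp (by simpa using h)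
  cases hlc : line.toList with
  | nil => exact absurd hlc hcs
  | cons c0 rest =>
  have hg0 : PySem.List.pyGet? (c0 :: rest) 0 = some c0 := PySem.List.pyGet?_zero_cons c0 rest
  have hg1' : PySem.List.pyGet? (c0 :: rest) (PySem.Chars.len (c0 :: rest) - 1) =
      (c0 :: rest).getLast? := by
    have h1 : PySem.Chars.len (c0 :: rest) - 1 = ((rest.length : Nat) : Int) := by
      simp [PySem.Chars.len]
    rw [h1, PySem.List.pyGet?_natCast, List.getLast?_eq_getElem?]
    simp
  cases hlast : (c0 :: rest).getLast? with
  | none => simp [List.getLast?_eq_none_iff] at hlast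
  | some cl =>
  have hg1 := hg1'.trans hlast
  have hsw : PySem.Chars.startswith (c0 :: rest) ['*'] = (c0 == '*') := by
    simp [PySem.Chars.startswith, List.isPrefixOf]
    constructor
    · intro h; exact h.symm
    · intro h; exact h.symm
  have hew : PySem.Chars.endswith (c0 :: rest) ['*'] = (cl == '*') := by
    cases hrr : (c0 :: rest).reverse with
    | nil => simp at hrr
    | cons d ds =>
      have hdl : (c0 :: rest).getLast? = some d := by
        rw [← List.head?_reverse, hrr]; rfl
      rw [hlast] at hdl
      injection hdl with hd
      simp only [PySem.Chars.endswith, List.isSuffixOf, hrr]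
      rw [← hd]
      simp [List.isPrefixOf, eq_comm]
  by_cases hguard : c0 = '*' ∧ cl = '*'
  case neg =>
    rw [LineAnalysis, LineAnalysis_alt]
    simp only [hlc, hg0, hg1, hsw, hew]
    rw [if_pos (by tauto)]
    rw [if_pos (by simpa using hguard)]
  case pos =>
    obtain ⟨h0, h1⟩ := hguard
    subst h0; subst h1
    obtain ⟨gs, hsf, henc⟩ := pvDecomp ('*' :: rest) (by simp)
      (by simp) (by rw [hlast])
    have hsplit : PySem.Chars.splitOn ('*' :: rest) ['*'] = [] :: (gs ++ [[]]) := by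
      rw [pvSplitOn_eq, henc, pvSplitChar_enc gs hsf]
    have hdotsA : PySem.Chars.replace ('*' :: rest) ['*'] [] = gs.flatten := by
      rw [pvReplace_eq, pvFilter_eq_flatten, henc, pvSplitChar_enc gs hsf]
      simp
    have hdotsB : PySem.Chars.join [] (PySem.Chars.splitOn ('*' :: rest) ['*']) = gs.flatten := by
      rw [hsplit]
      show List.intercalate [] _ = _
      rw [pvIntercalateNil]
      simp
    rw [LineAnalysis, LineAnalysis_alt]
    simp only [hlc, hg0, hg1, hsw, hew]
    rw [if_neg (show ¬ ('*' ≠ '*' ∨ '*' ≠ '*') by simp)]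
    rw [if_neg (show ¬ ¬ ((('*' == '*') = true) ∧ (('*' == '*') = true)) by simp)]
    rw [hdotsA, hdotsB]
    by_cases hfl : gs.flatten = []
    · rw [if_pos hfl, if_pos hfl]
    rw [if_neg hfl, if_neg hfl]
    rw [pvADots_eq]
    by_cases hany : gs.flatten.any (fun c => c ≠ '.') = true
    · rw [if_pos (by simpa using hany), if_pos hany]
    rw [if_neg (by simpa using hany), if_neg hany]
    by_cases hcnt : PySem.Chars.count ('*' :: rest) ['*'] < 3
    · rw [if_pos hcnt, if_pos hcnt]
    rw [if_neg hcnt, if_neg hcnt]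
    have hdots : ∀ g ∈ gs, ∀ c ∈ g, c = '.' := by
      intro g hg c hc
      by_contra hne
      exact hany (List.any_eq_true.mpr ⟨c, List.mem_flatten.mpr ⟨g, hg, hc⟩, by simpa using hne⟩)
    have hlen2 : 2 ≤ gs.length := by
      have hc2 := pvCount_eq_parts ('*' :: rest)
      rw [show pvSplitChar ('*' :: rest) = [] :: (gs ++ [[]]) from by rw [henc, pvSplitChar_enc gs hsf]] at hc2
      have h3 : ¬ PySem.Chars.count ('*' :: rest) ['*'] < 3 := hcnt
      rw [pvCount_eq ('*' :: rest)] at h3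
      simp only [List.length_cons, List.length_append, List.length_singleton, List.length_nil] at hc2
      omega
    cases gs with
    | nil => simp at hlen2
    | cons g1 gtl =>
    have hrest : rest = g1 ++ '*' :: (gtl.map (· ++ ['*'])).flatten := by
      have := henc
      simp only [pvEnc, List.map_cons, List.flatten_cons] at this
      injection this with _ h2
      simpa using h2
    have hsc : pvABlock (List.drop 1 ('*' :: rest)) ['*'] = '*' :: g1 := by
      rw [List.drop_one, List.tail_cons, hrest]
      exact pvABlock_spec g1 _ ['*'] (hsf g1 (by simp))
    rw [hsplit, pvSliceMid [] [], hsc]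
    have hq : PySem.Int.floordiv (PySem.Chars.len ('*' :: rest)) (PySem.List.len ('*' :: g1)) =
        ((((pvEnc (g1 :: gtl)).length / (g1.length + 1) : Nat)) : Int) := by
      show PySem.Int.floordiv ((('*' :: rest).length : Int)) ((('*' :: g1).length : Int)) = _
      rw [PySem.Int.floordiv_natCast]
      rw [henc]
      simp
    rw [hq]
    have hpr : PySem.List.pyRepeat ('*' :: g1) ((((pvEnc (g1 :: gtl)).length / (g1.length + 1) : Nat)) : Int) =
        (List.replicate ((pvEnc (g1 :: gtl)).length / (g1.length + 1)) ('*' :: g1)).flatten := by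
      simp only [PySem.List.pyRepeat, Int.toNat_natCast]
    rw [hpr, henc]
    have htl := pvTiling (g1 :: gtl) g1 (by simp) hlen2 hdots hfl
    by_cases ht : (List.replicate ((pvEnc (g1 :: gtl)).length / (g1.length + 1)) ('*' :: g1)).flatten ++ ['*'] = pvEnc (g1 :: gtl)
    · rw [if_pos ht]
      have hall := htl.mp ht
      symm
      rw [List.all_eq_true]
      intro g hg
      simp [hall g hg]
    · rw [if_neg ht]
      symm
      rw [← Bool.not_eq_true, List.all_eq_true]
      intro hcon
      apply ht
      apply htl.mpr
      intro g hg
      have := hcon g hg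
      simpa using this

-- ===== VERDICT =====
theorem LineAnalysis_spec : Claim_equal_LineAnalysis := by
  intro line _ hpre
  unfold Spec_LineAnalysis
  exact pvMain line hpre
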